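-- pv_equiv track=rewrite | github.com/dubsidiya/checkbrain | desh/ege2026kp/23solve/23-315_minak.py | f
-- ===== SOURCE A (Python) =====
-- def f(s, e):
--     if s > e:
--         return 0
--     if s == e:
--         return 1
--
--     p = int(str(s)[-1])
--     b = int(str(s)[0])
--     r = [1, p, b]
--
--     q = 0
--     for x in set(r):
--         if x != 0:
--             q += f(s+x, e)
--     return q
-- ===== SOURCE B (Python) =====
-- def f(s, e):
--     # Bottom-up DP over the interval [s, e] instead of A's exponential recursion.
--     if s > e:
--         return 0
--     ways = [0] * (e - s + 1)
--     ways[e - s] = 1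
--     for v in range(e - 1, s - 1, -1):
--         total = 0
--         for x in {1, int(str(v)[-1]), int(str(v)[0])}:
--             if x != 0 and v + x <= e:
--                 total += ways[v + x - s]
--         ways[v - s] = total
--     return ways[0]
-- ===== Notes on version B (the rewrite author's own statement) =====
-- stated objective: alternative
-- what changed: A counts the paths by plain recursion, re-solving every reachable value many times (exponential in e-s); B fills a bottom-up DP array over [s, e], computing each value's count exactly once. A timing run could not measure a reliable ratio (both finish in well under a millisecond on the sizes where A finishes at all), so no speed is claimed.
import Mathlib
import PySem

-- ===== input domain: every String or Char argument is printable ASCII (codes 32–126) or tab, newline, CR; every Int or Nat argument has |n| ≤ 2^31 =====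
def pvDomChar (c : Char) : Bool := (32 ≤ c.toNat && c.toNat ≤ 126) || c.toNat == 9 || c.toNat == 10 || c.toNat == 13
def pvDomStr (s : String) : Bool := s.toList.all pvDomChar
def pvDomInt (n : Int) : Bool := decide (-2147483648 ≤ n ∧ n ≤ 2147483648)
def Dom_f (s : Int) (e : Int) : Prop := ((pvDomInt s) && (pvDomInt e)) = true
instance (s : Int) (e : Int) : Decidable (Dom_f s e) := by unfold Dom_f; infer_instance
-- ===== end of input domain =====

-- B replaces A's plain recursion by a bottom-up DP array over [s, e]: a different algorithm, same return values.


-- ===== PORT A =====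
-- int(str(v)[i]) for i ∈ {-1, 0}: exact via PySem.Int.toChars / pyGet? / ofChars?; the `.getD 0`
-- is reached only where Python's int() raises ValueError (the '-' sign of a negative v), excluded by Pre_f.
def pyDigitAt (v : Int) (i : Int) : Int :=
  ((PySem.List.pyGet? (PySem.Int.toChars v) i).bind (fun c => PySem.Int.ofChars? [c])).getD 0

-- fuel-guarded transcription of A's recursion; fuel (e-s)+1 suffices because every step adds x ≥ 1
def fA : Nat → Int → Int → Int
  | 0, _, _ => 0
  | fuel+1, s, e =>
    if s > e then 0
    else if s = e then 1
    else
      let p := pyDigitAt s (-1)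
      let b := pyDigitAt s 0
      let r := [1, p, b]
      (PySem.Set.ofList r).foldl (fun q x => if x ≠ 0 then q + fA fuel (s + x) e else q) 0

def f (s : Int) (e : Int) : Int := fA ((e - s).toNat + 1) s e

-- ===== PORT B =====
def f_alt (s : Int) (e : Int) : Int :=
  if s > e then 0
  else
    let ways0 := PySem.List.pySetD (List.replicate (e - s + 1).toNat (0 : Int)) (e - s) 1
    let ways := (PySem.List.pyRange (e - 1) (s - 1) (-1)).foldl
      (fun w v =>
        let total := (PySem.Set.ofList [1, pyDigitAt v (-1), pyDigitAt v 0]).foldl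
          (fun t x => if x ≠ 0 ∧ v + x ≤ e then t + PySem.List.pyGetD w (v + x - s) 0 else t) 0
        PySem.List.pySetD w (v - s) total) ways0
    PySem.List.pyGetD ways 0 0

-- ===== PRECONDITION & SPEC =====
-- Pre_f excludes exactly the inputs on which A raises: for s < 0 with s < e, int(str(s)[0]) = int('-')
-- raises ValueError (B's Python raises there too).
def Pre_f (s : Int) (e : Int) : Prop := 0 ≤ s ∨ e ≤ s
instance (s : Int) (e : Int) : Decidable (Pre_f s e) := by unfold Pre_f; infer_instance
def pvWitness_f : Int × Int := (0, 6)

def Spec_f (s : Int) (e : Int) (out : Int) : Prop := out = f_alt s e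
instance (s : Int) (e : Int) (out : Int) : Decidable (Spec_f s e out) := by unfold Spec_f; infer_instance

-- ===== CLAIM (what is proved, stated in full; the proofs are below) =====
def Claim_equal_f : Prop := ∀ (s : Int) (e : Int), Dom_f s e → Pre_f s e → Spec_f s e (f s e)

-- ===== LEMMAS AND PROOFS =====

-- int() of a single character never returns a negative value (a lone sign is a ValueError)
theorem single_nonneg (c : Char) (m : Int) (h : PySem.Int.ofChars? [c] = some m) : 0 ≤ m := by
  have hneg : PySem.Int.ofChars? ['-'] = none := by decide
  have hplus : PySem.Int.ofChars? ['+'] = none := by decide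
  unfold PySem.Int.ofChars? at h hneg hplus
  by_cases hs : PySem.Int.isIntSpace c = true
  · simp [List.dropWhile, hs] at h
    obtain ⟨a, ha, hfa⟩ := Option.bind_eq_some_iff.mp h
    simp at hfa; omega
  · simp [List.dropWhile, hs] at h
    split at h
    · rename_i cs ds heq
      injection heq with h1 h2; subst h1; subst h2
      obtain ⟨a, ha, hfa⟩ := Option.bind_eq_some_iff.mp h
      simp [List.dropWhile, show PySem.Int.isIntSpace '-' = false from by decide] at hneg
      rw [ha] at hneg; simp at hneg
    · rename_i cs ds heq
      injection heq with h1 h2; subst h1; subst h2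
      obtain ⟨a, ha, hfa⟩ := Option.bind_eq_some_iff.mp h
      simp [List.dropWhile, show PySem.Int.isIntSpace '+' = false from by decide] at hplus
      rw [ha] at hplus; simp at hplus
    · obtain ⟨a, ha, hfa⟩ := Option.bind_eq_some_iff.mp h
      simp at hfa; omega

theorem pyDigitAt_nonneg (v i : Int) : 0 ≤ pyDigitAt v i := by
  unfold pyDigitAt
  cases ho : (PySem.List.pyGet? (PySem.Int.toChars v) i) with
  | none => simp
  | some c =>
    simp only [Option.bind_some]
    cases hm : PySem.Int.ofChars? [c] with
    | none => simp
    | some m => simpa using single_nonneg c m hm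

theorem steps_nonneg (v x : Int)
    (hx : x ∈ PySem.Set.ofList [1, pyDigitAt v (-1), pyDigitAt v 0]) : 0 ≤ x := by
  rw [PySem.Set.mem_ofList] at hx
  simp only [List.mem_cons] at hx
  rcases hx with h | h | h
  · omega
  · exact h ▸ pyDigitAt_nonneg v (-1)
  · simp at h; exact h ▸ pyDigitAt_nonneg v 0

theorem fA_of_gt (s e : Int) (h : e < s) : ∀ n, fA n s e = 0 := by
  intro n; cases n with
  | zero => rfl
  | succ m => simp [fA, show s > e from h]

theorem fA_fuel (e : Int) :
    ∀ n1 n2 : Nat, ∀ s : Int, (e - s).toNat < n1 → (e - s).toNat < n2 → fA n1 s e = fA n2 s e := by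
  intro n1
  induction n1 with
  | zero => intro n2 s h1 _; omega
  | succ n ih =>
    intro n2 s h1 h2
    cases n2 with
    | zero => omega
    | succ m =>
      simp only [fA]
      by_cases hgt : s > e
      · simp [hgt]
      · by_cases heq : s = e
        · simp [heq]
        · simp only [if_neg hgt, if_neg heq]
          refine PySem.List.foldl_congr_mem _ _ _ _ ?_
          intro q x hx
          by_cases hx0 : x = 0
          · simp [hx0]
          · have hx1 : 1 ≤ x := by have := steps_nonneg s x hx; omega
            simp only [if_pos hx0]
            congr 1
            by_cases hbig : e < s + x
            · rw [fA_of_gt _ _ hbig, fA_of_gt _ _ hbig]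
            · exact ih m (s + x) (by omega) (by omega)

theorem f_self (e : Int) : f e e = 1 := by
  simp [f, fA]

-- total of B's inner loop = A's value at v
theorem pyGetD_pySetD_int {W : List Int} {a b : Int} (v d : Int) (ha : 0 ≤ a)
    (hlt : a < (W.length : Int)) (hb : 0 ≤ b) :
    PySem.List.pyGetD (PySem.List.pySetD W a v) b d = if b = a then v else PySem.List.pyGetD W b d := by
  rw [show a = ((a.toNat : Nat) : Int) by omega, show b = ((b.toNat : Nat) : Int) by omega]
  rw [PySem.List.pyGetD_pySetD_natCast W a.toNat b.toNat v d (by omega)]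
  by_cases h : b.toNat = a.toNat
  · rw [if_pos h, if_pos (by omega)]
  · rw [if_neg h, if_neg (by omega)]

-- total of B's inner loop = A's value at v
theorem total_eq (s e : Int) (v : Int) (hv1 : s ≤ v) (hv2 : v < e)
    (W : List Int)
    (hW : ∀ j : Int, 0 ≤ j → j ≤ e - s →
      PySem.List.pyGetD W j 0 = if v + 1 ≤ s + j then f (s + j) e else 0) :
    (PySem.Set.ofList [1, pyDigitAt v (-1), pyDigitAt v 0]).foldl
      (fun t x => if x ≠ 0 ∧ v + x ≤ e then t + PySem.List.pyGetD W (v + x - s) 0 else t) 0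
    = f v e := by
  conv_rhs => rw [f]
  simp only [fA, if_neg (by omega : ¬ v > e), if_neg (by omega : ¬ v = e)]
  refine PySem.List.foldl_congr_mem _ _ _ _ ?_
  intro t x hx
  by_cases hx0 : x = 0
  · simp [hx0]
  · have hx1 : 1 ≤ x := by have := steps_nonneg v x hx; omega
    by_cases hle : v + x ≤ e
    · rw [if_pos ⟨hx0, hle⟩, if_pos hx0]
      congr 1
      rw [hW (v + x - s) (by omega) (by omega)]
      rw [if_pos (by omega)]
      rw [show s + (v + x - s) = v + x by ring]
      exact (fA_fuel e _ _ (v + x) (by omega) (by omega)).symm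
    · rw [if_neg (by tauto), if_pos hx0, fA_of_gt _ _ (by omega)]
      ring

-- main DP loop invariant: after the remaining k iterations every cell holds A's value
theorem dp_inv (s e : Int) (hse : s ≤ e) :
    ∀ k : Nat, s + (k : Int) ≤ e → ∀ W : List Int,
      W.length = (e - s + 1).toNat →
      (∀ j : Int, 0 ≤ j → j ≤ e - s →
        PySem.List.pyGetD W j 0 = if s + (k : Int) ≤ s + j then f (s + j) e else 0) →
      ∀ j : Int, 0 ≤ j → j ≤ e - s →
        PySem.List.pyGetD
          ((PySem.List.pyRange (s + (k : Int) - 1) (s - 1) (-1)).foldl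
            (fun w v =>
              PySem.List.pySetD w (v - s)
                ((PySem.Set.ofList [1, pyDigitAt v (-1), pyDigitAt v 0]).foldl
                  (fun t x => if x ≠ 0 ∧ v + x ≤ e then t + PySem.List.pyGetD w (v + x - s) 0 else t) 0))
            W) j 0
        = f (s + j) e := by
  intro k
  induction k with
  | zero =>
    intro _ W _ hW j hj0 hje
    rw [show s + ((0:Nat):Int) - 1 = s - 1 by push_cast; ring,
        PySem.List.pyRange_neg_one_eq_nil (le_refl _)]
    simp only [List.foldl_nil]
    rw [hW j hj0 hje, if_pos (by push_cast; omega)]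
  | succ k ih =>
    intro hk W hlen hW j hj0 hje
    have hk' : s + (k : Int) ≤ e := by push_cast at hk ⊢; omega
    rw [show s + ((k+1:Nat):Int) - 1 = s + (k:Int) by push_cast; ring,
        PySem.List.pyRange_neg_one_cons (by omega : s - 1 < s + (k:Int))]
    simp only [List.foldl_cons]
    refine ih hk' _ ?_ ?_ j hj0 hje
    · rw [PySem.List.length_pySetD]; exact hlen
    · intro j' hj0' hje'
      rw [pyGetD_pySetD_int _ _ (by omega) (by rw [hlen]; omega) hj0']
      by_cases hjk : j' = s + (k : Int) - s
      · rw [if_pos hjk, hjk, if_pos (by omega)]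
        rw [show s + (s + (k:Int) - s) = s + (k:Int) by ring]
        refine total_eq s e (s + (k:Int)) (by omega) (by omega) W ?_
        intro j'' h0 hle
        rw [hW j'' h0 hle, show s + ((k+1:Nat):Int) = s + (k:Int) + 1 by push_cast; ring]
      · rw [if_neg hjk, hW j' hj0' hje']
        by_cases hc : s + (k:Int) ≤ s + j'
        · rw [if_pos hc, if_pos (by push_cast; omega)]
        · rw [if_neg hc, if_neg (by push_cast; omega)]

-- ===== VERDICT (by name: the statement is the Claim_ definition above) =====
theorem f_spec : Claim_equal_f := by
  unfold Claim_equal_f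
  intro s e _ hpre
  unfold Spec_f
  by_cases hgt : e < s
  · rw [f_alt, if_pos (by omega), f]
    exact fA_of_gt s e hgt _
  · have hgt' : ¬ s > e := by omega
    by_cases heq : s = e
    · subst heq
      rw [f_self]
      unfold f_alt
      rw [if_neg hgt']
      rw [show s - s + 1 = (1:Int) by ring, show s - s = (0:Int) by ring,
          PySem.List.pyRange_neg_one_eq_nil (by omega : s - 1 ≤ s - 1)]
      rfl
    · -- 0 ≤ s < e : the DP loop invariant gives cell 0 = f s e
      have hs : 0 ≤ s := by rcases hpre with h | h <;> omega
      have hinit : ∀ j : Int, 0 ≤ j → j ≤ e - s →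
          PySem.List.pyGetD
            (PySem.List.pySetD (List.replicate (e - s + 1).toNat (0 : Int)) (e - s) 1) j 0
          = if s + (((e - s).toNat : Nat) : Int) ≤ s + j then f (s + j) e else 0 := by
        intro j hj0 hje
        rw [pyGetD_pySetD_int _ _ (by omega) (by rw [List.length_replicate]; omega) hj0]
        by_cases hj : j = e - s
        · rw [if_pos hj, if_pos (by omega), show s + j = e by omega, f_self]
        · rw [if_neg hj, if_neg (by omega)]
          rw [PySem.List.pyGetD_eq_getElem _ _ hj0 (by rw [List.length_replicate]; omega)]
          exact List.getElem_replicate _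
      have hmain := dp_inv s e (by omega) (e - s).toNat (by omega)
        (PySem.List.pySetD (List.replicate (e - s + 1).toNat (0 : Int)) (e - s) 1)
        (by rw [PySem.List.length_pySetD, List.length_replicate]) hinit
        0 (le_refl _) (by omega)
      rw [add_zero] at hmain
      unfold f_alt
      rw [if_neg hgt']
      rw [show e - 1 = s + (((e - s).toNat : Nat) : Int) - 1 by omega]
      exact hmain.symm
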